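-- pv_equiv track=rewrite | github.com/luiseufrasio/codility | python/2010/prefix_set.py | solution
-- ===== SOURCE A (Python) =====
-- def solution(A):
--     B = []
--     p = 0
--     for i in range(0,len(A)):
--         if not A[i] in B:
--             B.append(A[i])
--             p = i
--     return p
-- ===== SOURCE B (Python) =====
-- def solution(A):
--     # The answer is the largest index that is a first occurrence (0 for empty input).
--     # Scan from the back and return the first index i whose value first occurs at i.
--     for i, x in reversed(list(enumerate(A))):
--         if A.index(x) == i:
--             return i
--     return 0
-- ===== Notes on version B (the rewrite author's own statement) =====
-- stated objective: alternative
-- what changed: Instead of A's forward scan that accumulates a seen-list and tracks the answer inline, B scans the list backwards with an early return, returning the first index i (from the end) whose value first occurs at i (tested with A.index(x) == i), keeping no auxiliary state.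
import Mathlib
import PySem

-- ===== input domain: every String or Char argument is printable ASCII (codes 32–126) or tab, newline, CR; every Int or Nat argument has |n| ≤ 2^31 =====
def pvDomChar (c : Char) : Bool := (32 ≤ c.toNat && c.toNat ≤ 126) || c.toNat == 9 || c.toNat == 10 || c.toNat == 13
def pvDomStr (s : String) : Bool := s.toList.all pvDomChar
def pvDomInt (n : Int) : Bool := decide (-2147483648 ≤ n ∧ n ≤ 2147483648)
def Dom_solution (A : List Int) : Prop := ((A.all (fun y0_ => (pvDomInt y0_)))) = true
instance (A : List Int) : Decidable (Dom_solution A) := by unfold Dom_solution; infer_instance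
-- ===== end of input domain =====

-- B scans backwards with an early return, testing whether the value first occurs at the
-- current index via A.index, instead of A's forward seen-list accumulation: alternative decomposition.


-- ===== PORT A =====
-- 'for i in range(0, len(A)): … A[i] …' is ported as a fold over enumerate A 0 (exact:
-- every i of the range is in bounds and A[i] is the paired element).
def solution (A : List Int) : Int :=
  ((PySem.List.enumerate A 0).foldl
    (fun (st : List Int × Int) (q : Int × Int) =>
      if st.1.contains q.2 then st else (st.1 ++ [q.2], q.1))
    ([], 0)).2

-- ===== PORT B =====
-- the loop body: early 'return i' becomes stopping the recursion; A.index(x) is index?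
-- (x is drawn from A, so Python's .index never raises; the none branch is unreachable).
def solAltLoop (A : List Int) : List (Int × Int) → Int
  | [] => 0
  | q :: rest =>
    match PySem.List.index? A q.2 with
    | some k => if (k : Int) = q.1 then q.1 else solAltLoop A rest
    | none => solAltLoop A rest

def solution_alt (A : List Int) : Int :=
  solAltLoop A ((PySem.List.enumerate A 0).reverse)

-- ===== PRECONDITION & SPEC =====
def Spec_solution (A : List Int) (out : Int) : Prop := out = solution_alt A
instance (A : List Int) (out : Int) : Decidable (Spec_solution A out) := by unfold Spec_solution; infer_instance

-- ===== CLAIM (what is proved, stated in full; the proofs are below) =====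
def Claim_equal_solution : Prop := ∀ (A : List Int), Dom_solution A → Spec_solution A (solution A)

-- ===== LEMMAS AND PROOFS =====

-- 'i is a first occurrence' as a Boolean predicate on an enumerate pair.
def pvHit (A : List Int) (q : Int × Int) : Bool :=
  ((PySem.List.index? A q.2).map (fun k => (k : Int))) == some q.1

-- B's loop is 'first pair satisfying pvHit, else 0'.
lemma solAltLoop_eq_find (A : List Int) :
    ∀ (m : List (Int × Int)),
      solAltLoop A m = (((m.find? (pvHit A)).map (·.1)).getD 0)
  | [] => rfl
  | q :: rest => by
    simp only [solAltLoop, List.find?_cons]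
    cases h : PySem.List.index? A q.2 with
    | none =>
      simp only [pvHit, h]
      simp [solAltLoop_eq_find A rest]
    | some k =>
      by_cases hk : (k : Int) = q.1
      · have hb : pvHit A q = true := by simp only [pvHit, h]; simpa using hk
        simp only [hb]
        simp [hk]
      · have hb : pvHit A q = false := by simp only [pvHit, h]; simpa using hk
        simp only [hb]
        simp [solAltLoop_eq_find A rest]
        exact fun he => absurd he hk

-- first hit of the reversed list = last-hit fold over the list.
lemma find_reverse_eq_foldl (A : List Int) :
    ∀ (l : List (Int × Int)) (d : Int),
      (((l.reverse.find? (pvHit A)).map (·.1)).getD d)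
        = l.foldl (fun p q => if pvHit A q then q.1 else p) d
  | [], d => rfl
  | q :: t, d => by
    rw [List.foldl_cons, ← find_reverse_eq_foldl A t]
    simp only [List.reverse_cons, List.find?_append]
    cases hf : t.reverse.find? (pvHit A) with
    | some r => simp
    | none =>
      by_cases hq : pvHit A q = true
      · simp [List.find?, hq]
      · simp [List.find?, hq]

-- index? A y = some n exactly when y does not occur before position n (given A[n] = y).
lemma index?_head_drop (A : List Int) (n : Nat) (y : Int) (t : List Int)
    (hd : A.drop n = y :: t) :
    (PySem.List.index? A y = some n ↔ y ∉ A.take n) := by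
  have hn : n ≤ A.length := by
    by_contra h
    rw [List.drop_eq_nil_of_le (le_of_not_ge h)] at hd
    simp at hd
  have hsplit : A = A.take n ++ y :: t := by
    conv_lhs => rw [← List.take_append_drop n A, hd]
  have hlen : (A.take n).length = n := List.length_take_of_le hn
  constructor
  · intro hidx hmem
    obtain ⟨pre, suf, hA, hpre, hnot⟩ := (PySem.List.index?_eq_some_iff A y n).mp hidx
    have hp : A.take n = pre := by
      have := congrArg (List.take n) hA
      rwa [List.take_append_of_le_length (le_of_eq hpre.symm), List.take_of_length_le (le_of_eq hpre)] at this
    exact hnot (hp ▸ hmem)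
  · intro hnot
    exact (PySem.List.index?_eq_some_iff A y n).mpr ⟨A.take n, t, hsplit, hlen, hnot⟩

-- Main invariant: A's fold equals the last-hit fold, given the seen-list holds
-- exactly the values of the processed prefix.
lemma fold_eq_hits (A : List Int) :
    ∀ (t : List Int) (n : Nat) (B : List Int) (p : Int),
      A.drop n = t →
      (∀ x, B.contains x = true ↔ x ∈ A.take n) →
      ((PySem.List.enumerate t (n : Int)).foldl
        (fun (st : List Int × Int) (q : Int × Int) =>
          if st.1.contains q.2 then st else (st.1 ++ [q.2], q.1)) (B, p)).2
        = (PySem.List.enumerate t (n : Int)).foldl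
            (fun p q => if pvHit A q then q.1 else p) p
  | [], n, B, p, _, _ => by simp [PySem.List.enumerate_nil]
  | y :: t, n, B, p, hd, hB => by
    have hidx := index?_head_drop A n y t hd
    have hd' : A.drop (n + 1) = t := by
      have h1 : List.drop 1 (List.drop n A) = List.drop 1 (y :: t) := by rw [hd]
      simpa [List.drop_drop, Nat.add_comm] using h1
    have htake : A.take (n + 1) = A.take n ++ [y] := by
      have hn : n < A.length := by
        by_contra h
        rw [List.drop_eq_nil_of_le (le_of_not_gt h)] at hd
        simp at hd
      have hy : A[n] = y := by
        have := congrArg (fun l => l.head?) hd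
        simpa [List.head?_drop, List.getElem?_eq_getElem hn] using this
      rw [List.take_add_one, List.getElem?_eq_getElem hn, hy]
      rfl
    rw [PySem.List.enumerate_cons]
    by_cases hc : B.contains y = true
    · have hin : y ∈ A.take n := (hB y).mp hc
      have hhit : pvHit A (↑n, y) = false := by
        cases h : PySem.List.index? A y with
        | none => simp only [pvHit, h]; rfl
        | some k =>
          have hk : ¬ ((k : Int) = (n : Int)) := by
            intro he
            have hkn : k = n := by exact_mod_cast he
            have h' : PySem.List.index? A y = some n := by rw [← hkn]; exact h
            exact (hidx.mp h') hin
          simp only [pvHit, h]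
          simpa using hk
      simp only [List.foldl_cons, hc, if_pos, hhit, Bool.false_eq_true, if_false]
      exact fold_eq_hits A t (n + 1) B p hd' (by
        intro x
        rw [hB x, htake]
        constructor
        · exact fun h => List.mem_append_left _ h
        · intro h
          rcases List.mem_append.mp h with h | h
          · exact h
          · simp only [List.mem_singleton] at h
            exact h ▸ hin)
    · have hnin : y ∉ A.take n := fun h => hc ((hB y).mpr h)
      have hhit : pvHit A (↑n, y) = true := by
        simp only [pvHit, hidx.mpr hnin]
        simp
      simp only [List.foldl_cons, hc, Bool.false_eq_true, if_false, hhit, if_pos]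
      exact fold_eq_hits A t (n + 1) (B ++ [y]) (↑n) hd' (by
        intro x
        rw [htake]
        simp only [List.contains_append, Bool.or_eq_true, hB x, List.mem_append]
        simp)

-- ===== VERDICT (by name: the statement is the Claim_ definition above) =====
theorem solution_spec : Claim_equal_solution := by
  intro A _
  unfold Spec_solution solution solution_alt
  rw [solAltLoop_eq_find, find_reverse_eq_foldl]
  exact fold_eq_hits A A 0 [] 0 (by simp) (by simp)
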